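-- pv_equiv track=rewrite | github.com/Hanhur/ComputerNetworks | Checksum/main.py | fletcher_32
-- ===== SOURCE A (Python) =====
-- def fletcher_32(data):
--     """Вычисляет 32-битную контрольную сумму Флетчера"""
--     if isinstance(data, str):
--         data = data.encode('utf-8')
--
--     sum1 = 0
--     sum2 = 0
--
--     for byte in data:
--         sum1 = (sum1 + byte) % 65535
--         sum2 = (sum2 + sum1) % 65535
--
--     return (sum2 << 16) | sum1
-- ===== SOURCE B (Python) =====
-- def fletcher_32(data):
--     """Вычисляет 32-битную контрольную сумму Флетчера"""
--     if isinstance(data, str):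
--         data = data.encode('utf-8')
--     n = len(data)
--     sum1 = sum(data) % 65535
--     sum2 = sum((n - k) * b for k, b in enumerate(data)) % 65535
--     return (sum2 << 16) | sum1
-- ===== Notes on version B (the rewrite author's own statement) =====
-- stated objective: alternative
-- what changed: Replaces the two threaded running accumulators (per-byte mod updates) with closed-form contributions: sum1 is a direct sum and sum2 a weighted sum sum((n-k)*b_k), each reduced mod 65535 once at the end.
import Mathlib
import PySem

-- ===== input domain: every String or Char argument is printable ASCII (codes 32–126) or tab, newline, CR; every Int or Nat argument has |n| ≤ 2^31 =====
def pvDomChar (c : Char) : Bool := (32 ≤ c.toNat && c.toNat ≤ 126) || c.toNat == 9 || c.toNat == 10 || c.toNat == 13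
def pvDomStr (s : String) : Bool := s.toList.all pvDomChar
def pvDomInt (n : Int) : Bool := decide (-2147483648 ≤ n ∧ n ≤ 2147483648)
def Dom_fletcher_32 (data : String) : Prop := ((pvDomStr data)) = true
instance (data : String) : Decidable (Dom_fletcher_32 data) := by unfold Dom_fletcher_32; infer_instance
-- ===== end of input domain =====

-- B replaces A's two threaded running accumulators by a direct sum and a weighted sum
-- Σ(n-k)·b_k, each reduced mod 65535 once at the end (objective: alternative decomposition).
-- On the ASCII domain utf-8 bytes are exactly the character codes.

-- ===== PORT A =====
def fletcher_32 (data : String) : Int :=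
  let bytes := data.toList.map (fun c => (c.toNat : Int))
  let p := bytes.foldl (fun (p : Int × Int) b =>
      let s1 := PySem.Int.mod (p.1 + b) 65535
      (s1, PySem.Int.mod (p.2 + s1) 65535)) (0, 0)
  PySem.Int.bor (p.2 <<< (16 : Nat)) p.1

-- ===== PORT B =====
def fletcher_32_alt (data : String) : Int :=
  let bytes := data.toList.map (fun c => (c.toNat : Int))
  let n : Int := bytes.length
  let sum1 := PySem.Int.mod bytes.sum 65535
  let sum2 := PySem.Int.mod (((PySem.List.enumerate bytes 0).map (fun kb => (n - kb.1) * kb.2)).sum) 65535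
  PySem.Int.bor (sum2 <<< (16 : Nat)) sum1

-- ===== PRECONDITION & SPEC =====
def Spec_fletcher_32 (data : String) (out : Int) : Prop := out = fletcher_32_alt data
instance (data : String) (out : Int) : Decidable (Spec_fletcher_32 data out) := by unfold Spec_fletcher_32; infer_instance

-- ===== CLAIM (what is proved, stated in full; the proofs are below) =====
def Claim_equal_fletcher_32 : Prop := ∀ (data : String), Dom_fletcher_32 data → Spec_fletcher_32 data (fletcher_32 data)

-- ===== LEMMAS AND PROOFS =====

-- exact value of A's second accumulator started at x (no mod)
def pvW (x : Int) : List Int → Int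
  | [] => 0
  | b :: t => (x + b) + pvW (x + b) t

-- weighted sum Σ (len-k)·b_k, structurally
def pvWsum : List Int → Int
  | [] => 0
  | b :: t => ((t.length : Int) + 1) * b + pvWsum t

theorem pvW_eq (l : List Int) : ∀ (x : Int), pvW x l = (l.length : Int) * x + pvWsum l := by
  induction l with
  | nil => intro x; simp [pvW, pvWsum]
  | cons b t ih =>
    intro x
    simp only [pvW, pvWsum, ih (x + b), List.length_cons]
    push_cast
    ring

theorem pvEnum_sum (l : List Int) : ∀ (s : Nat),
    ((PySem.List.enumerate l (s : Int)).map (fun kb => (((s : Int) + (l.length : Int)) - kb.1) * kb.2)).sum = pvWsum l := by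
  induction l with
  | nil => intro s; simp [PySem.List.enumerate_nil, pvWsum]
  | cons b t ih =>
    intro s
    rw [PySem.List.enumerate_cons]
    simp only [List.map_cons, List.sum_cons, List.length_cons, pvWsum]
    have h1 : ((s : Int) + ((t.length : Nat) + 1 : Nat) - (s : Int)) = ((t.length : Int) + 1) := by
      push_cast; ring
    have h2 : ((PySem.List.enumerate t ((s : Int) + 1)).map
        (fun kb => (((s : Int) + ((t.length : Nat) + 1 : Nat) : Int) - kb.1) * kb.2)).sum = pvWsum t := by
      have := ih (s + 1)
      have hfun : (fun kb : Int × Int => ((((s + 1 : Nat) : Int) + (t.length : Int)) - kb.1) * kb.2)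
          = (fun kb : Int × Int => (((s : Int) + ((t.length : Nat) + 1 : Nat) : Int) - kb.1) * kb.2) := by
        funext kb; push_cast; ring_nf
      rw [hfun] at this
      have hs : ((s + 1 : Nat) : Int) = (s : Int) + 1 := by push_cast; ring
      rw [hs] at this
      exact this
    rw [h1, h2]

theorem pvFold_eq (l : List Int) : ∀ (x y : Int),
    l.foldl (fun (p : Int × Int) b =>
      let s1 := PySem.Int.mod (p.1 + b) 65535
      (s1, PySem.Int.mod (p.2 + s1) 65535)) (PySem.Int.mod x 65535, PySem.Int.mod y 65535)
    = (PySem.Int.mod (x + l.sum) 65535, PySem.Int.mod (y + pvW x l) 65535) := by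
  induction l with
  | nil => intro x y; simp [pvW]
  | cons b t ih =>
    intro x y
    simp only [List.foldl_cons, List.sum_cons, pvW]
    have hm : ∀ a : Int, PySem.Int.mod a 65535 = a % 65535 := fun a =>
      PySem.Int.mod_eq_emod_of_pos (by norm_num)
    have e1 : PySem.Int.mod (PySem.Int.mod x 65535 + b) 65535 = PySem.Int.mod (x + b) 65535 := by
      simp only [hm]; omega
    have e2 : PySem.Int.mod (PySem.Int.mod y 65535 + PySem.Int.mod (x + b) 65535) 65535
        = PySem.Int.mod (y + (x + b)) 65535 := by
      simp only [hm]; omega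
    rw [e1, e2]
    rw [ih (x + b) (y + (x + b))]
    have : x + b + t.sum = x + (b + t.sum) := by ring
    rw [this]
    have : y + (x + b) + pvW (x + b) t = y + (x + b + pvW (x + b) t) := by ring
    rw [this]

-- ===== VERDICT (by name: the statement is the Claim_ definition above) =====
theorem fletcher_32_spec : Claim_equal_fletcher_32 := by
  intro data _
  unfold Spec_fletcher_32 fletcher_32 fletcher_32_alt
  set bytes := data.toList.map (fun c => (c.toNat : Int)) with hb
  have h0 : (0 : Int) = PySem.Int.mod 0 65535 := by decide
  have hf := pvFold_eq bytes 0 0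
  rw [← h0] at hf
  simp only [hf, zero_add]
  have hW : pvW 0 bytes = pvWsum bytes := by
    rw [pvW_eq]; ring
  have hE := pvEnum_sum bytes 0
  simp only [Nat.cast_zero, zero_add] at hE
  rw [hW, hE]
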